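-- pv_equiv track=rewrite | github.com/daniel-reich/ubiquitous-fiesta | 6LwzPRc6LrauEgr7H_12.py | worm_length
-- ===== SOURCE A (Python) =====
-- def worm_length(worm):
--   n=0
--   for i in worm:
--     if i == "-":
--       n+=10
--     else:
--       return "invalid"
--   if n == 0:
--     return "invalid"
--   return str(n) + " mm."
-- ===== SOURCE B (Python) =====
-- def worm_length(worm):
--     if worm and set(worm) == {"-"}:
--         return str(len(worm) * 10) + " mm."
--     return "invalid"
-- ===== Notes on version B (the rewrite author's own statement) =====
-- stated objective: simpler
-- what changed: Replaces the accumulator loop with early return by a validate-then-multiply closed form: check set(worm) == {'-'} and return str(len(worm)*10).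
import Mathlib
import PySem

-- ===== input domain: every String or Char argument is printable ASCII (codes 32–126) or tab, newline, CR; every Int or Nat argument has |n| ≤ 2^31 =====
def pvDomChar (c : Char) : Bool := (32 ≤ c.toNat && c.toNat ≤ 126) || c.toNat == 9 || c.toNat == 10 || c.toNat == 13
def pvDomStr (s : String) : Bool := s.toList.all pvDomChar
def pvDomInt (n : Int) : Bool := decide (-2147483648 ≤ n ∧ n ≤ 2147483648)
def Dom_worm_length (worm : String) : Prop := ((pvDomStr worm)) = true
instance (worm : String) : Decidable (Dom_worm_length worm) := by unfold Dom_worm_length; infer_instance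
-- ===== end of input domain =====

-- B replaces A's accumulator loop (with early return) by a closed form: validate set(worm) == {'-'} then return str(len(worm)*10) + " mm."; objective: simpler.

-- ===== PORT A =====
-- the for-loop with accumulator n and early return "invalid"
def wormA : List Char → Int → String
  | [], n => if n = 0 then "invalid" else PySem.Int.toStr n ++ " mm."
  | c :: cs, n => if c = '-' then wormA cs (n + 10) else "invalid"

def worm_length (worm : String) : String := wormA worm.toList 0

-- ===== PORT B =====
def worm_length_alt (worm : String) : String :=
  let cs := worm.toList
  if cs ≠ [] ∧ PySem.Set.equal (PySem.Set.ofList cs) (PySem.Set.ofList ['-']) = true then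
    PySem.Int.toStr ((cs.length : Int) * 10) ++ " mm."
  else "invalid"

-- ===== PRECONDITION & SPEC =====
def Spec_worm_length (worm : String) (out : String) : Prop := out = worm_length_alt worm
instance (worm : String) (out : String) : Decidable (Spec_worm_length worm out) := by unfold Spec_worm_length; infer_instance

-- ===== CLAIM (what is proved, stated in full; the proofs are below) =====
def Claim_equal_worm_length : Prop := ∀ (worm : String), Dom_worm_length worm → Spec_worm_length worm (worm_length worm)

-- ===== LEMMAS AND PROOFS =====

-- A's loop, characterised: with accumulator n it returns the closed form below.
theorem wormA_char (cs : List Char) : ∀ n : Int,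
    wormA cs n = if cs.all (· = '-') then
        (if n + 10 * cs.length = 0 then "invalid" else PySem.Int.toStr (n + 10 * cs.length) ++ " mm.")
      else "invalid" := by
  induction cs with
  | nil => intro n; simp [wormA]
  | cons c cs ih =>
    intro n
    simp only [wormA, List.all_cons, Bool.and_eq_true, decide_eq_true_eq, List.length_cons]
    by_cases hc : c = '-'
    · rw [if_pos hc, ih]
      have : n + 10 + 10 * (cs.length : Int) = n + 10 * ((cs.length : Int) + 1) := by ring
      simp [hc, this]
    · simp [hc]

theorem set_eq_dash (cs : List Char) :
    (cs ≠ [] ∧ PySem.Set.equal (PySem.Set.ofList cs) (PySem.Set.ofList ['-']) = true)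
      ↔ (cs ≠ [] ∧ cs.all (· = '-') = true) := by
  constructor
  · rintro ⟨h1, h2⟩
    refine ⟨h1, ?_⟩
    rw [PySem.Set.equal_iff] at h2
    simp only [List.all_eq_true, decide_eq_true_eq]
    intro c hc
    have := (h2 c).1 (by simpa [PySem.Set.mem_ofList] using hc)
    simpa [PySem.Set.mem_ofList] using this
  · rintro ⟨h1, h2⟩
    refine ⟨h1, ?_⟩
    rw [PySem.Set.equal_iff]
    simp only [List.all_eq_true, decide_eq_true_eq] at h2
    intro x
    constructor
    · intro hx
      have hx' : x ∈ cs := by simpa [PySem.Set.mem_ofList] using hx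
      simp [PySem.Set.mem_ofList, h2 x hx']
    · intro hx
      have hx' : x = '-' := by simpa [PySem.Set.mem_ofList] using hx
      obtain ⟨c, hc⟩ := List.exists_mem_of_ne_nil cs h1
      have hd : c = '-' := h2 c hc
      have hcm : '-' ∈ cs := hd ▸ hc
      simpa [PySem.Set.mem_ofList, hx'] using hcm

-- ===== VERDICT (by name: the statement is the Claim_ definition above) =====
theorem worm_length_spec : Claim_equal_worm_length := by
  intro worm _
  unfold Spec_worm_length worm_length worm_length_alt
  rw [wormA_char]
  by_cases hall : worm.toList.all (· = '-') = true
  · by_cases hnil : worm.toList = []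
    · simp [hnil]
    · have hlen : (0:Int) < 10 * worm.toList.length := by
        have : 0 < worm.toList.length := List.length_pos_of_ne_nil hnil
        positivity
      rw [if_pos hall]
      rw [if_neg (by omega)]
      have hb : worm.toList ≠ [] ∧ PySem.Set.equal (PySem.Set.ofList worm.toList) (PySem.Set.ofList ['-']) = true :=
        (set_eq_dash worm.toList).2 ⟨hnil, hall⟩
      simp only [if_pos hb]
      ring_nf
  · rw [if_neg hall]
    have : ¬ (worm.toList ≠ [] ∧ PySem.Set.equal (PySem.Set.ofList worm.toList) (PySem.Set.ofList ['-']) = true) := by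
      intro h
      exact hall ((set_eq_dash worm.toList).1 h).2
    simp only [if_neg this]
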